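-- pv_equiv track=rewrite | github.com/joaofaria19/PL2023 | TPC5/cabine.py | moeda_handler
-- ===== SOURCE A (Python) =====
-- def moeda_handler(lista_moedas):
--     moedas_validas = ['5c','10c','20c','50c','1e','2e']
--     moedas_total = 0
--     moedas_invalidas = []
--
--     for moeda in lista_moedas:
--         if moeda not in moedas_validas:
--             moedas_invalidas.append(moeda)
--         else:
--             if moeda == '1e' or moeda == '2e':
--                 moeda = moeda[:-1]
--                 moeda = int(moeda) * 100
--             else:
--                 moeda = moeda[:-1]
--             moedas_total += int(moeda)
--
--     moeda_invalidas_string=''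
--
--     if len(moedas_invalidas) > 0:
--         for moeda in moedas_invalidas:
--             moeda_invalidas_string += moeda+", "
--
--     return (moedas_total,moeda_invalidas_string)
-- ===== SOURCE B (Python) =====
-- def moeda_handler(lista_moedas):
--     valores = {'5c': 5, '10c': 10, '20c': 20, '50c': 50, '1e': 100, '2e': 200}
--     total = sum(v * lista_moedas.count(c) for c, v in valores.items())
--     invalidas = ''.join(m + ", " for m in lista_moedas if m not in valores)
--     return (total, invalidas)
-- ===== Notes on version B (the rewrite author's own statement) =====
-- stated objective: alternative
-- what changed: Replaces A's single element-wise accumulator loop (list membership test, string slicing and '1e'/'2e' arithmetic parsing, then a second loop over the collected invalid list) by staged aggregation: the total is computed as sum of value*count(coin) over the six-entry coin table, and the invalid string is a join over the filtered invalid coins.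
import Mathlib
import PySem

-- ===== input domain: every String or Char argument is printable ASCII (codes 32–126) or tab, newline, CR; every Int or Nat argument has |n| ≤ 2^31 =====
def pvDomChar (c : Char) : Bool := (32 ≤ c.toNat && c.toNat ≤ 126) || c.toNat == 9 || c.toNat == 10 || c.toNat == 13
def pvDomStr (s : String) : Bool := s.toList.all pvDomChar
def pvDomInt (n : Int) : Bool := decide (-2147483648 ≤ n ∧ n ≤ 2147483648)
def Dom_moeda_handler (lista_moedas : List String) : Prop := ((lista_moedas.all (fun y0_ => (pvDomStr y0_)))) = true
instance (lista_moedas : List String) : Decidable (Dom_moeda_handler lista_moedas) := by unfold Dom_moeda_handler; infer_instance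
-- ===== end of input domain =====

-- B: staged aggregation — total = sum over the 6-entry coin table of value × count(coin),
-- invalid string = join of the filtered invalid coins — instead of A's element-wise
-- accumulator loop with slice-and-parse arithmetic (alternative decomposition, same cost).


-- ===== PORT A =====
def pvValidasA : List String := ["5c", "10c", "20c", "50c", "1e", "2e"]

-- A's main loop: state (moedas_total, moedas_invalidas).  int(…) is ported as
-- (PySem.Int.ofStr? …).getD 0; this branch runs only for members of pvValidasA
-- ('5c', …, '2e'), on which int() of the slice always succeeds, so .getD 0 is exact.
def pvLoopA : List String → Int × List String → Int × List String
  | [], st => st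
  | moeda :: rest, (total, inval) =>
    if moeda ∉ pvValidasA then
      pvLoopA rest (total, inval ++ [moeda])
    else
      let v : Int :=
        if moeda = "1e" ∨ moeda = "2e" then
          ((PySem.Int.ofStr? (PySem.Str.slice moeda none (some (-1)))).getD 0) * 100
        else
          (PySem.Int.ofStr? (PySem.Str.slice moeda none (some (-1)))).getD 0
      pvLoopA rest (total + v, inval)

-- A's second loop: moeda_invalidas_string += moeda + ", "
def pvJoinA : List String → String → String
  | [], acc => acc
  | moeda :: rest, acc => pvJoinA rest (acc ++ moeda ++ ", ")

def moeda_handler (lista_moedas : List String) : Int × String :=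
  let st := pvLoopA lista_moedas (0, [])
  let s := if st.2.length > 0 then pvJoinA st.2 "" else ""
  (st.1, s)

-- ===== PORT B =====
def pvValores : PySem.Dict String Int :=
  PySem.Dict.ofList [("5c", 5), ("10c", 10), ("20c", 20), ("50c", 50), ("1e", 100), ("2e", 200)]

-- sum(v * lista_moedas.count(c) for c, v in valores.items())
def pvTotalB (lista_moedas : List String) : Int :=
  pvValores.items.foldl (fun acc cv => acc + cv.2 * (PySem.List.count lista_moedas cv.1 : Int)) 0

def moeda_handler_alt (lista_moedas : List String) : Int × String :=
  let total := pvTotalB lista_moedas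
  -- ''.join(m + ", " for m in lista_moedas if m not in valores)
  let invalidas := PySem.Str.join ""
    ((lista_moedas.filter (fun m => !(pvValores.contains m))).map (fun m => m ++ ", "))
  (total, invalidas)

-- ===== PRECONDITION & SPEC =====
def Spec_moeda_handler (lista_moedas : List String) (out : Int × String) : Prop := out = moeda_handler_alt lista_moedas
instance (lista_moedas : List String) (out : Int × String) : Decidable (Spec_moeda_handler lista_moedas out) := by unfold Spec_moeda_handler; infer_instance

-- ===== CLAIM (what is proved, stated in full; the proofs are below) =====
def Claim_equal_moeda_handler : Prop := ∀ (lista_moedas : List String), Dom_moeda_handler lista_moedas → Spec_moeda_handler lista_moedas (moeda_handler lista_moedas)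

-- ===== LEMMAS AND PROOFS =====

lemma pvValores_eq_mk :
    pvValores = PySem.Dict.mk [("5c", 5), ("10c", 10), ("20c", 20), ("50c", 50), ("1e", 100), ("2e", 200)] := by
  decide

lemma pvValores_not_contains (m : String) (hm : m ∉ pvValidasA) :
    pvValores.contains m = false := by
  simp [pvValidasA] at hm
  obtain ⟨h1, h2, h3, h4, h5, h6⟩ := hm
  simp [pvValores_eq_mk, PySem.Dict.contains,
    Ne.symm h1, Ne.symm h2, Ne.symm h3, Ne.symm h4, Ne.symm h5, Ne.symm h6]

lemma pvTotalB_expand (xs : List String) :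
    pvTotalB xs = 5 * (xs.count "5c" : Int) + 10 * (xs.count "10c" : Int)
      + 20 * (xs.count "20c" : Int) + 50 * (xs.count "50c" : Int)
      + 100 * (xs.count "1e" : Int) + 200 * (xs.count "2e" : Int) := by
  simp [pvTotalB, pvValores_eq_mk, List.foldl, PySem.List.count_eq]

lemma pvStepA_5c (rest : List String) (t : Int) (inv : List String) :
    pvLoopA ("5c" :: rest) (t, inv) = pvLoopA rest (t + 5, inv) := by
  have hv : ((PySem.Int.ofStr? (PySem.Str.slice "5c" none (some (-1)))).getD 0 : Int) = 5 := by decide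
  simp [pvLoopA, pvValidasA, hv]

lemma pvStepA_10c (rest : List String) (t : Int) (inv : List String) :
    pvLoopA ("10c" :: rest) (t, inv) = pvLoopA rest (t + 10, inv) := by
  have hv : ((PySem.Int.ofStr? (PySem.Str.slice "10c" none (some (-1)))).getD 0 : Int) = 10 := by decide
  simp [pvLoopA, pvValidasA, hv]

lemma pvStepA_20c (rest : List String) (t : Int) (inv : List String) :
    pvLoopA ("20c" :: rest) (t, inv) = pvLoopA rest (t + 20, inv) := by
  have hv : ((PySem.Int.ofStr? (PySem.Str.slice "20c" none (some (-1)))).getD 0 : Int) = 20 := by decide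
  simp [pvLoopA, pvValidasA, hv]

lemma pvStepA_50c (rest : List String) (t : Int) (inv : List String) :
    pvLoopA ("50c" :: rest) (t, inv) = pvLoopA rest (t + 50, inv) := by
  have hv : ((PySem.Int.ofStr? (PySem.Str.slice "50c" none (some (-1)))).getD 0 : Int) = 50 := by decide
  simp [pvLoopA, pvValidasA, hv]

lemma pvStepA_1e (rest : List String) (t : Int) (inv : List String) :
    pvLoopA ("1e" :: rest) (t, inv) = pvLoopA rest (t + 100, inv) := by
  have hv : ((PySem.Int.ofStr? (PySem.Str.slice "1e" none (some (-1)))).getD 0 : Int) = 1 := by decide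
  simp [pvLoopA, pvValidasA, hv]

lemma pvStepA_2e (rest : List String) (t : Int) (inv : List String) :
    pvLoopA ("2e" :: rest) (t, inv) = pvLoopA rest (t + 200, inv) := by
  have hv : ((PySem.Int.ofStr? (PySem.Str.slice "2e" none (some (-1)))).getD 0 : Int) = 2 := by decide
  simp [pvLoopA, pvValidasA, hv]

lemma pvLoopA_eq : ∀ (xs : List String) (t : Int) (inv : List String),
    pvLoopA xs (t, inv) =
      (t + pvTotalB xs, inv ++ xs.filter (fun m => !(pvValores.contains m))) := by
  intro xs
  induction xs with
  | nil =>
    intro t inv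
    simp [pvLoopA, pvTotalB_expand]
  | cons m rest ih =>
    intro t inv
    by_cases hm : m ∈ pvValidasA
    · have hm' := hm
      simp [pvValidasA] at hm'
      rcases hm' with h | h | h | h | h | h <;> subst h
      · rw [pvStepA_5c, ih]
        refine Prod.ext ?_ ?_
        · simp only [pvTotalB_expand, List.count_cons]; push_cast; simp; ring
        · simp [show pvValores.contains "5c" = true from by decide]
      · rw [pvStepA_10c, ih]
        refine Prod.ext ?_ ?_
        · simp only [pvTotalB_expand, List.count_cons]; push_cast; simp; ring
        · simp [show pvValores.contains "10c" = true from by decide]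
      · rw [pvStepA_20c, ih]
        refine Prod.ext ?_ ?_
        · simp only [pvTotalB_expand, List.count_cons]; push_cast; simp; ring
        · simp [show pvValores.contains "20c" = true from by decide]
      · rw [pvStepA_50c, ih]
        refine Prod.ext ?_ ?_
        · simp only [pvTotalB_expand, List.count_cons]; push_cast; simp; ring
        · simp [show pvValores.contains "50c" = true from by decide]
      · rw [pvStepA_1e, ih]
        refine Prod.ext ?_ ?_
        · simp only [pvTotalB_expand, List.count_cons]; push_cast; simp; ring
        · simp [show pvValores.contains "1e" = true from by decide]
      · rw [pvStepA_2e, ih]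
        refine Prod.ext ?_ ?_
        · simp only [pvTotalB_expand, List.count_cons]; push_cast; simp; ring
        · simp [show pvValores.contains "2e" = true from by decide]
    · have hc := pvValores_not_contains m hm
      rw [show pvLoopA (m :: rest) (t, inv) = pvLoopA rest (t, inv ++ [m]) from by
        simp [pvLoopA, hm], ih]
      simp [pvValidasA] at hm
      obtain ⟨h1, h2, h3, h4, h5, h6⟩ := hm
      refine Prod.ext ?_ ?_
      · simp only [pvTotalB_expand, List.count_cons, beq_iff_eq, h1, h2, h3, h4, h5, h6,
          if_false]
        push_cast; ring
      · simp [hc]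

lemma pvJoin_empty_cons (s : String) (l : List String) :
    PySem.Str.join "" (s :: l) = s ++ PySem.Str.join "" l := by
  cases l with
  | nil => simp [PySem.Str.join, PySem.Chars.join_singleton, PySem.Chars.join_nil]
  | cons b r => simp [PySem.Str.join, PySem.Chars.join_cons_cons]

lemma pvJoinA_eq_join : ∀ (l : List String) (acc : String),
    pvJoinA l acc = acc ++ PySem.Str.join "" (l.map (fun m => m ++ ", ")) := by
  intro l
  induction l with
  | nil => intro acc; simp [pvJoinA, PySem.Str.join, PySem.Chars.join_nil]
  | cons x r ih =>
    intro acc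
    rw [List.map_cons, pvJoin_empty_cons, pvJoinA, ih, ← String.append_assoc,
      ← String.append_assoc]

-- ===== VERDICT (by name: the statement is the Claim_ definition above) =====
theorem moeda_handler_spec : Claim_equal_moeda_handler := by
  intro xs _
  unfold Spec_moeda_handler moeda_handler moeda_handler_alt
  rw [pvLoopA_eq xs 0 []]
  simp only [List.nil_append, Int.zero_add]
  rcases hc : xs.filter (fun m => !(pvValores.contains m)) with _ | ⟨a, l⟩
  · simp [PySem.Str.join, PySem.Chars.join_nil]
  · simp [pvJoinA_eq_join]
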